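-- pv_equiv track=rewrite | github.com/munkhdorj-m/2025-11th-Python-Abstract-Data-Types-1 | assignment.py | bank_simulation
-- ===== SOURCE A (Python) =====
-- class Queue:
--     def __init__(self):
--         self.items = []
--
--     def enqueue(self, item):
--         self.items.append(item)
--
--     def dequeue(self):
--         if not self.is_empty():
--             return self.items.pop(0)
--         return None
--
--     def is_empty(self):
--         return len(self.items) == 0
--
-- def bank_simulation(customers):
--     q = Queue()
--
--     for name in customers:
--         q.enqueue(name)
--
--     output = ""
--     while not q.is_empty():
--         output += f"Serving: {q.dequeue()}\n"
--
--     return output.strip()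
-- ===== SOURCE B (Python) =====
-- def bank_simulation(customers):
--     return "\n".join(f"Serving: {name}" for name in customers).strip()
-- ===== Notes on version B (the rewrite author's own statement) =====
-- stated objective: faster
-- what changed: Drops the Queue class and its two-pass build-then-drain control flow (pop(0) shifting plus repeated string concatenation); B formats each customer in one direct traversal, joins the lines with '\n' and applies the same final strip().
import Mathlib
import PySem

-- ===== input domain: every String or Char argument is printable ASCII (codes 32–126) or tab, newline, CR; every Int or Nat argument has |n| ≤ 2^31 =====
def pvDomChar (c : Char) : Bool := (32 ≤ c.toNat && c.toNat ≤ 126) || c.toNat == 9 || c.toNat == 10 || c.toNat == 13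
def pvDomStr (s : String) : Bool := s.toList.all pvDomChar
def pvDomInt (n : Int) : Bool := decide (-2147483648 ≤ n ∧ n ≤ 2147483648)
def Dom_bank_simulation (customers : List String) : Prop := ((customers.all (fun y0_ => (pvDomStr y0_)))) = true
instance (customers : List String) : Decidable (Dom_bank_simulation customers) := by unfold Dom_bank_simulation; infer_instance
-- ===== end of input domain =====

-- B replaces A's Queue object and its build-then-drain double loop (with repeated string
-- concatenation) by a single traversal joined with "\n" plus the same final strip()
-- (objective: simpler).

-- ===== PORT A =====
-- the character list of the literal "Serving: " (String literals are opaque to the kernel)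
def servPrefix : List Char := ['S', 'e', 'r', 'v', 'i', 'n', 'g', ':', ' ']

-- A's while loop: dequeue from the front, append "Serving: {name}\n" to the output
def bankWhile : List String → List Char → List Char
  | [], out => out
  | name :: rest, out => bankWhile rest (out ++ (servPrefix ++ name.toList ++ ['\n']))

def bank_simulation (customers : List String) : String :=
  -- the enqueue loop: q.items grows by appending each name
  let items := customers.foldl (fun acc name => acc ++ [name]) ([] : List String)
  String.ofList (PySem.Chars.strip (bankWhile items []))

-- ===== PORT B =====
-- f"Serving: {name}" of one customer
def bankPart (name : String) : List Char := servPrefix ++ name.toList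

def bank_simulation_alt (customers : List String) : String :=
  String.ofList (PySem.Chars.strip (PySem.Chars.join ['\n'] (customers.map bankPart)))

-- ===== PRECONDITION & SPEC =====
def Spec_bank_simulation (customers : List String) (out : String) : Prop :=
  out = bank_simulation_alt customers
instance (customers : List String) (out : String) : Decidable (Spec_bank_simulation customers out) := by
  unfold Spec_bank_simulation; infer_instance

-- ===== CLAIM (what is proved, stated in full; the proofs are below) =====
def Claim_equal_bank_simulation : Prop := ∀ (customers : List String), Dom_bank_simulation customers → Spec_bank_simulation customers (bank_simulation customers)

-- ===== LEMMAS AND PROOFS =====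

-- A's while loop flattens the lines
theorem bankWhile_eq (cs : List String) (out : List Char) :
    bankWhile cs out = out ++ (cs.map (fun n => bankPart n ++ ['\n'])).flatten := by
  induction cs generalizing out with
  | nil => simp [bankWhile]
  | cons c t ih => simp [bankWhile, ih, bankPart]

-- the flattened "line + newline" form is B's join followed by one newline
theorem flatten_eq_join (c : String) (cs : List String) :
    ((c :: cs).map (fun n => bankPart n ++ ['\n'])).flatten
      = PySem.Chars.join ['\n'] ((c :: cs).map bankPart) ++ ['\n'] := by
  induction cs generalizing c with
  | nil => simp [PySem.Chars.join_singleton]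
  | cons d t ih =>
      simp only [List.map_cons, List.flatten_cons] at *
      rw [ih d, PySem.Chars.join_cons_cons]
      simp

-- a trailing newline does not change rstrip
theorem rstrip_append_newline (x : List Char) :
    PySem.Chars.rstrip (x ++ ['\n']) = PySem.Chars.rstrip x := by
  unfold PySem.Chars.rstrip
  rw [show (x ++ ['\n']).reverse = '\n' :: x.reverse by simp,
      List.dropWhile_cons_of_pos (by decide)]

-- a trailing newline does not change strip
theorem strip_append_newline (x : List Char) :
    PySem.Chars.strip (x ++ ['\n']) = PySem.Chars.strip x := by
  unfold PySem.Chars.strip PySem.Chars.lstrip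
  rw [List.dropWhile_append]
  cases hx : List.dropWhile PySem.Chars.isspace x with
  | nil =>
      simp only [List.isEmpty_nil, if_true,
        show List.dropWhile PySem.Chars.isspace ['\n'] = [] from by decide]
  | cons a t =>
      simp only [List.isEmpty_cons, if_false, Bool.false_eq_true]
      exact rstrip_append_newline (a :: t)

-- A on a nonempty customer list, before the strip: B's join plus a trailing newline
theorem bankA_chars (c : String) (cs : List String) :
    bank_simulation (c :: cs)
      = String.ofList (PySem.Chars.strip
          (PySem.Chars.join ['\n'] ((c :: cs).map bankPart) ++ ['\n'])) := by
  show String.ofList (PySem.Chars.strip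
      (bankWhile ((c :: cs).foldl (fun acc name => acc ++ [name]) []) [])) = _
  rw [PySem.List.foldl_append_singleton, List.nil_append, bankWhile_eq, List.nil_append,
      flatten_eq_join]

-- ===== VERDICT (by name: the statement is the Claim_ definition above) =====
theorem bank_simulation_spec : Claim_equal_bank_simulation := by
  intro customers _
  cases customers with
  | nil => rfl
  | cons c cs =>
    show bank_simulation (c :: cs) = bank_simulation_alt (c :: cs)
    rw [bankA_chars]
    unfold bank_simulation_alt
    rw [strip_append_newline]
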